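-- pv_equiv track=rewrite | github.com/yxqd/mantid | scripts/Muon/GUI/Common/dummy_create/dummy_create_model.py | convert
-- ===== SOURCE A (Python) =====
-- def convert(values_in):
--     value = values_in.split(",")
--     out = ""
--     if len(value) >1 :
--        out+='['
--        for xx in value:
--            out+=str(xx) +","
--        out = out[:-1]
--        out +="]"
--     else: # if its not a list we know its output workspace
--           # so need quotes
--        out ='"'+str( value[0])+'"'
--     return out
-- ===== SOURCE B (Python) =====
-- def convert(values_in):
--     # Splitting on "," and re-joining with "," reconstructs the original
--     # string, so build the output directly without any loop.
--     if "," in values_in: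
--         return "[" + values_in + "]"
--     return '"' + values_in + '"'
-- ===== Notes on version B (the rewrite author's own statement) =====
-- stated objective: simpler
-- what changed: A splits on commas and rebuilds the string piece by piece in a loop; B observes that re-joining the split pieces with commas reconstructs the input, so it wraps the input in brackets (comma present) or quotes (no comma) directly, with no split and no loop.
import Mathlib
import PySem

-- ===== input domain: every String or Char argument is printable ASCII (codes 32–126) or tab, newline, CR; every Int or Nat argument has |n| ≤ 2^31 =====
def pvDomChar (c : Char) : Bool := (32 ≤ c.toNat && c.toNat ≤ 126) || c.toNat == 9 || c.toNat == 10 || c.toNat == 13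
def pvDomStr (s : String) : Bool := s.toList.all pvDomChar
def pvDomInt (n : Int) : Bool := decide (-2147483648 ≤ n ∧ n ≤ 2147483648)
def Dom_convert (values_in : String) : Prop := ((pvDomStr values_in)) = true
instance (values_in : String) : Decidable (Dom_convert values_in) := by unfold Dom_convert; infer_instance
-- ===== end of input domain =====

-- B replaces A's split/rebuild loop with a direct closed-form concatenation
-- (splitting on "," and re-joining with "," reconstructs the input); objective: simpler.

-- ===== PORT A =====
def convert (values_in : String) : String :=
  let value : List String := (PySem.Chars.splitOn values_in.toList ",".toList).map String.ofList
  let out : String := ""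
  if value.length > 1 then
    let out := out ++ "["
    let out := value.foldl (fun acc xx => acc ++ xx ++ ",") out
    let out := PySem.Str.slice out none (some (-1))   -- out[:-1]
    out ++ "]"
  else
    -- value[0] always exists: split(",") returns at least one piece
    "\"" ++ PySem.List.pyGetD value 0 "" ++ "\""

-- ===== PORT B =====
def convert_alt (values_in : String) : String :=
  if PySem.Str.isIn "," values_in then "[" ++ values_in ++ "]"
  else "\"" ++ values_in ++ "\""

-- ===== PRECONDITION & SPEC =====
def Spec_convert (values_in : String) (out : String) : Prop := out = convert_alt values_in
instance (values_in : String) (out : String) : Decidable (Spec_convert values_in out) := by unfold Spec_convert; infer_instance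

-- ===== CLAIM (what is proved, stated in full; the proofs are below) =====
def Claim_equal_convert : Prop := ∀ (values_in : String), Dom_convert values_in → Spec_convert values_in (convert values_in)

-- ===== LEMMAS AND PROOFS =====

lemma join_concat (c : Char) (ys : List (List Char)) (a : List Char) :
    PySem.Chars.join [c] (ys ++ [a]) =
      if ys = [] then a else PySem.Chars.join [c] ys ++ c :: a := by
  induction ys with
  | nil => simp [PySem.Chars.join_singleton]
  | cons y ys ih =>
    cases ys with
    | nil => simp [PySem.Chars.join_singleton, PySem.Chars.join_cons_cons]
    | cons z zs =>
      simp only [List.cons_append] at ih ⊢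
      rw [PySem.Chars.join_cons_cons, ih]
      simp [PySem.Chars.join_cons_cons]

lemma go_join (c : Char) (fuel : Nat) (l cur : List Char) (acc : List (List Char))
    (h : l.length ≤ fuel) :
    PySem.Chars.join [c] (PySem.Chars.splitOn.go [c] fuel l cur acc) =
      PySem.Chars.join [c] (acc.reverse ++ [cur.reverse ++ l]) := by
  induction fuel generalizing l cur acc with
  | zero =>
    have : l = [] := List.eq_nil_of_length_eq_zero (Nat.le_zero.mp h)
    subst this
    simp [PySem.Chars.splitOn.go]
  | succ f ih =>
    cases l with
    | nil => simp [PySem.Chars.splitOn.go]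
    | cons ch rest =>
      by_cases hc : ch = c
      · subst hc
        have hgo : PySem.Chars.splitOn.go [ch] (f+1) (ch :: rest) cur acc =
            PySem.Chars.splitOn.go [ch] f rest [] (cur.reverse :: acc) := by
          simp [PySem.Chars.splitOn.go]
        rw [hgo, ih rest [] (cur.reverse :: acc) (by simpa using Nat.lt_succ_iff.mp (by simpa using h))]
        simp only [List.reverse_cons, List.reverse_nil, List.nil_append]
        rw [join_concat (ys := acc.reverse ++ [cur.reverse]), join_concat, join_concat]
        split_ifs with h1 h2 <;> simp_all
      · have hgo : PySem.Chars.splitOn.go [c] (f+1) (ch :: rest) cur acc =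
            PySem.Chars.splitOn.go [c] f rest (ch :: cur) acc := by
          simp [PySem.Chars.splitOn.go, List.isPrefixOf]
          intro h'; exact absurd h'.symm hc
        rw [hgo, ih rest (ch :: cur) acc (by simpa using Nat.lt_succ_iff.mp (by simpa using h))]
        simp

lemma go_length (c : Char) (fuel : Nat) (l cur : List Char) (acc : List (List Char))
    (h : l.length ≤ fuel) :
    (PySem.Chars.splitOn.go [c] fuel l cur acc).length = acc.length + 1 + l.count c := by
  induction fuel generalizing l cur acc with
  | zero =>
    have : l = [] := List.eq_nil_of_length_eq_zero (Nat.le_zero.mp h)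
    subst this
    simp [PySem.Chars.splitOn.go]
  | succ f ih =>
    cases l with
    | nil => simp [PySem.Chars.splitOn.go]
    | cons ch rest =>
      by_cases hc : ch = c
      · subst hc
        have hgo : PySem.Chars.splitOn.go [ch] (f+1) (ch :: rest) cur acc =
            PySem.Chars.splitOn.go [ch] f rest [] (cur.reverse :: acc) := by
          simp [PySem.Chars.splitOn.go]
        rw [hgo, ih rest [] (cur.reverse :: acc) (by simpa using Nat.lt_succ_iff.mp (by simpa using h))]
        simp
        omega
      · have hgo : PySem.Chars.splitOn.go [c] (f+1) (ch :: rest) cur acc =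
            PySem.Chars.splitOn.go [c] f rest (ch :: cur) acc := by
          simp [PySem.Chars.splitOn.go, List.isPrefixOf]
          intro h'; exact absurd h'.symm hc
        rw [hgo, ih rest (ch :: cur) acc (by simpa using Nat.lt_succ_iff.mp (by simpa using h))]
        simp [hc]

lemma splitOn_join (c : Char) (s : List Char) :
    PySem.Chars.join [c] (PySem.Chars.splitOn s [c]) = s := by
  unfold PySem.Chars.splitOn
  rw [go_join c (s.length + 1) s [] [] (by omega)]
  simp [PySem.Chars.join_singleton]

lemma splitOn_length (c : Char) (s : List Char) :
    (PySem.Chars.splitOn s [c]).length = 1 + s.count c := by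
  unfold PySem.Chars.splitOn
  rw [go_length c (s.length + 1) s [] [] (by omega)]
  simp

lemma singleton_infix_iff_mem (a : Char) (l : List Char) : [a] <:+: l ↔ a ∈ l := by
  constructor
  · intro h; exact h.sublist.mem (List.mem_singleton_self a)
  · intro h
    obtain ⟨s, t, rfl⟩ := List.mem_iff_append.mp h
    exact ⟨s, t, by simp⟩

lemma fold_comma_toList (value : List String) (init : String) :
    (value.foldl (fun acc xx => acc ++ xx ++ ",") init).toList =
      init.toList ++ value.flatMap (fun x => x.toList ++ [',']) := by
  induction value generalizing init with
  | nil => simp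
  | cons v vs ih => simp [List.foldl_cons, ih]

lemma flatMap_comma_eq_join (c : Char) (ps : List (List Char)) (h : ps ≠ []) :
    ps.flatMap (fun p => p ++ [c]) = PySem.Chars.join [c] ps ++ [c] := by
  induction ps with
  | nil => simp at h
  | cons p ps ih =>
    cases ps with
    | nil => simp [PySem.Chars.join_singleton]
    | cons q qs =>
      rw [List.flatMap_cons, ih (by simp), PySem.Chars.join_cons_cons]
      simp

-- ===== VERDICT (by name: the statement is the Claim_ definition above) =====
theorem convert_spec : Claim_equal_convert := by
  intro values_in _
  unfold Spec_convert convert convert_alt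
  simp only []
  set L := values_in.toList with hL
  have hsep : (",".toList) = [','] := rfl
  have hlen : ((PySem.Chars.splitOn L ",".toList).map String.ofList).length
      = 1 + L.count ',' := by
    rw [List.length_map, hsep, splitOn_length]
  have hisin : PySem.Str.isIn "," values_in = true ↔ ',' ∈ L := by
    rw [PySem.Str.isIn_iff_infix]
    exact singleton_infix_iff_mem ',' values_in.toList
  by_cases hmem : ',' ∈ L
  · -- comma present: A takes the list branch, B brackets the input directly
    have hcount : 0 < L.count ',' := List.count_pos_iff.mpr hmem
    rw [if_pos (by omega : ((PySem.Chars.splitOn L ",".toList).map String.ofList).length > 1),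
        if_pos (hisin.mpr hmem)]
    apply String.toList_inj.mp
    have hne : PySem.Chars.splitOn L [','] ≠ [] := by
      intro h0
      have := splitOn_length ',' L
      rw [h0] at this
      simp at this
      omega
    rw [String.toList_append, PySem.Str.slice_to_neg_one, fold_comma_toList]
    simp only [List.flatMap_map, String.toList_ofList, hsep]
    rw [flatMap_comma_eq_join ',' _ hne, splitOn_join,
        show (("" ++ "[").toList ++ (L ++ [','])) = (("" ++ "[").toList ++ L) ++ [','] by simp,
        List.dropLast_concat]
    simp
    exact hL
  · -- no comma: the split is [values_in] and A quotes its only element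
    have hcount : L.count ',' = 0 := List.count_eq_zero.mpr hmem
    rw [if_neg (by omega : ¬ ((PySem.Chars.splitOn L ",".toList).map String.ofList).length > 1),
        if_neg (by rw [hisin]; exact hmem)]
    obtain ⟨p, hp⟩ : ∃ p, PySem.Chars.splitOn L [','] = [p] := by
      have h1 : (PySem.Chars.splitOn L [',']).length = 1 := by
        rw [splitOn_length, hcount]
      match h : PySem.Chars.splitOn L [','] with
      | [p] => exact ⟨p, rfl⟩
      | [] => rw [h] at h1; simp at h1
      | p :: q :: r => rw [h] at h1; simp at h1
    have hpL : p = L := by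
      have := splitOn_join ',' L
      rw [hp, PySem.Chars.join_singleton] at this
      exact this
    rw [hsep, hp, hpL]
    simp only [List.map_cons, List.map_nil, PySem.List.pyGetD_zero_cons]
    have hofl : String.ofList L = values_in := String.ofList_toList
    rw [hofl]
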